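-- pv_equiv track=rewrite | github.com/iproha94/contests | fintech/2018.09.08/task3.py | recover_straight
-- ===== SOURCE A (Python) =====
-- def recover_straight(ls):
--     n = len(ls)
--     result = [0 for _ in range(n)]
--     curr = 1
--     for k in ls:
--         j = 0
--         for i in range(n):
--             if result[i] == 0:
--                 if j == k:
--                     result[i] = curr
--                     break
--                 else:
--                     j += 1
--         curr += 1
--     return result
-- ===== SOURCE B (Python) =====
-- def recover_straight(ls):
--     n = len(ls)
--     result = [0] * n
--     free = list(range(n))  # indices of still-empty slots, always sorted
--     curr = 1
--     for k in ls:
--         if 0 <= k < len(free):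
--             result[free.pop(k)] = curr
--         curr += 1
--     return result
-- ===== Notes on version B (the rewrite author's own statement) =====
-- stated objective: faster
-- what changed: B keeps an explicit sorted list of free positions and pops its k-th element directly, instead of A's inner scan over the whole array counting empty slots for every input element.
import Mathlib
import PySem

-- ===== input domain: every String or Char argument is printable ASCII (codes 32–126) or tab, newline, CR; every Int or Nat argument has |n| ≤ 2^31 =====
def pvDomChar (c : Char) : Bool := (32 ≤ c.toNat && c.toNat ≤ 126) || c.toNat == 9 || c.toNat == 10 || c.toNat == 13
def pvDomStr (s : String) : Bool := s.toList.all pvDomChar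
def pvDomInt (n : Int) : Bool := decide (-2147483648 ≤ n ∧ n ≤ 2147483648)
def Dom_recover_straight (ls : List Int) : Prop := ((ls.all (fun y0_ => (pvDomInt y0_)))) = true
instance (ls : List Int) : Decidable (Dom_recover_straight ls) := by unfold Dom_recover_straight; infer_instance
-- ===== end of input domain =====

-- B replaces A's per-element rescan of the whole array by a maintained sorted list of free
-- positions whose k-th element is popped directly (objective: faster, constant-factor).

-- ===== PORT A =====
-- inner 'for i in range(n)' loop of A: scan result, counting empty slots with j, break on j == k
def pvInnerA (res : List Int) (k curr j : Int) : List Int :=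
  match res with
  | [] => []
  | x :: xs =>
      if x = 0 then
        (if j = k then curr :: xs else x :: pvInnerA xs k curr (j + 1))
      else x :: pvInnerA xs k curr j

def recover_straight (ls : List Int) : List Int :=
  let n := ls.length
  let result : List Int := (PySem.List.pyRange 0 n 1).map (fun _ => 0)  -- [0 for _ in range(n)]
  (ls.foldl (fun st k => (pvInnerA st.1 k st.2 0, st.2 + 1)) (result, (1 : Int))).1

-- ===== PORT B =====
def recover_straight_alt (ls : List Int) : List Int :=
  let n := ls.length
  let result : List Int := List.replicate n 0            -- [0] * n
  let free : List Int := PySem.List.pyRange 0 n 1        -- list(range(n))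
  (ls.foldl (fun (st : List Int × List Int × Int) k =>
      if 0 ≤ k ∧ k < (st.2.1.length : Int) then
        match PySem.List.pop? st.2.1 k with
        | some r => (st.1.set r.1.toNat st.2.2, r.2, st.2.2 + 1)
          -- r.1 is a free position, nonnegative by construction, so .toNat is exact
        | none => (st.1, st.2.1, st.2.2 + 1)             -- unreachable under the guard
      else (st.1, st.2.1, st.2.2 + 1))
    (result, free, (1 : Int))).1

-- ===== PRECONDITION & SPEC =====
def Spec_recover_straight (ls : List Int) (out : List Int) : Prop := out = recover_straight_alt ls
instance (ls : List Int) (out : List Int) : Decidable (Spec_recover_straight ls out) := by unfold Spec_recover_straight; infer_instance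

-- ===== CLAIM (what is proved, stated in full; the proofs are below) =====
def Claim_equal_recover_straight : Prop := ∀ (ls : List Int), Dom_recover_straight ls → Spec_recover_straight ls (recover_straight ls)

-- ===== LEMMAS AND PROOFS =====

-- indices (as Ints, ascending) of the zero entries of a list
def pvZi : List Int → List Int
  | [] => []
  | x :: xs => if x = 0 then 0 :: (pvZi xs).map (· + 1) else (pvZi xs).map (· + 1)

theorem pvZi_nonneg (res : List Int) : ∀ p ∈ pvZi res, 0 ≤ p := by
  induction res with
  | nil => simp [pvZi]
  | cons x xs ih =>
      intro p hp
      simp only [pvZi] at hp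
      split_ifs at hp with hx
      · rcases List.mem_cons.1 hp with h | h
        · omega
        · rcases List.mem_map.1 h with ⟨q, hq, rfl⟩
          have := ih q hq; omega
      · rcases List.mem_map.1 hp with ⟨q, hq, rfl⟩
        have := ih q hq; omega

theorem pvGetD_map_add_one (l : List Int) (t : Nat) (ht : t < l.length) :
    (l.map (· + 1)).getD t 0 = l.getD t 0 + 1 := by
  simp [List.getD_eq_getElem?_getD, List.getElem?_eq_getElem ht,
    List.getElem?_map]

theorem pvGetD_mem (l : List Int) (t : Nat) (ht : t < l.length) :
    l.getD t 0 ∈ l := by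
  rw [List.getD_eq_getElem l 0 ht]; exact List.getElem_mem ht

theorem pvInnerA_spec (res : List Int) (k curr : Int) : ∀ j : Int,
    pvInnerA res k curr j =
      if 0 ≤ k - j ∧ (k - j).toNat < (pvZi res).length
      then res.set ((pvZi res).getD (k - j).toNat 0).toNat curr
      else res := by
  induction res with
  | nil => intro j; simp [pvInnerA, pvZi]
  | cons x xs ih =>
      intro j
      by_cases hx : x = 0
      · by_cases hj : j = k
        · subst hj; subst hx
          simp [pvInnerA, pvZi]
        · have hne : ¬ ((0:Int) = k - j) := by omega
          rw [show pvInnerA (x :: xs) k curr j = x :: pvInnerA xs k curr (j+1) by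
            simp [pvInnerA, hx, hj]]
          rw [ih (j+1)]
          have hL : (pvZi (x :: xs)) = 0 :: (pvZi xs).map (· + 1) := by simp [pvZi, hx]
          by_cases hc : 0 ≤ k - (j+1) ∧ (k - (j+1)).toNat < (pvZi xs).length
          · have h1 : 0 ≤ k - j ∧ (k - j).toNat < (pvZi (x :: xs)).length := by
              rw [hL]; simp; omega
            rw [if_pos hc, if_pos h1, hL]
            have ht : (k - j).toNat = (k - (j+1)).toNat + 1 := by omega
            rw [ht]
            have hgd : (0 :: (pvZi xs).map (· + 1)).getD ((k - (j+1)).toNat + 1) 0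
                = (pvZi xs).getD (k - (j+1)).toNat 0 + 1 := by
              have := pvGetD_map_add_one (pvZi xs) (k - (j+1)).toNat hc.2
              simpa [List.getD_cons_succ] using this
            rw [hgd]
            have hp : 0 ≤ (pvZi xs).getD (k - (j+1)).toNat 0 :=
              pvZi_nonneg xs _ (pvGetD_mem _ _ hc.2)
            have htn : ((pvZi xs).getD (k - (j+1)).toNat 0 + 1).toNat
                = ((pvZi xs).getD (k - (j+1)).toNat 0).toNat + 1 := by omega
            rw [htn, List.set_cons_succ]
          · have h1 : ¬ (0 ≤ k - j ∧ (k - j).toNat < (pvZi (x :: xs)).length) := by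
              rw [hL]; simp; omega
            rw [if_neg hc, if_neg h1]
      · rw [show pvInnerA (x :: xs) k curr j = x :: pvInnerA xs k curr j by
          simp [pvInnerA, hx]]
        rw [ih j]
        have hL : (pvZi (x :: xs)) = (pvZi xs).map (· + 1) := by simp [pvZi, hx]
        by_cases hc : 0 ≤ k - j ∧ (k - j).toNat < (pvZi xs).length
        · have h1 : 0 ≤ k - j ∧ (k - j).toNat < (pvZi (x :: xs)).length := by
            rw [hL]; simpa using hc
          rw [if_pos hc, if_pos h1, hL, pvGetD_map_add_one _ _ hc.2]
          have hp : 0 ≤ (pvZi xs).getD (k - j).toNat 0 :=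
            pvZi_nonneg xs _ (pvGetD_mem _ _ hc.2)
          have htn : ((pvZi xs).getD (k - j).toNat 0 + 1).toNat
              = ((pvZi xs).getD (k - j).toNat 0).toNat + 1 := by omega
          rw [htn, List.set_cons_succ]
        · have h1 : ¬ (0 ≤ k - j ∧ (k - j).toNat < (pvZi (x :: xs)).length) := by
            rw [hL]; simpa using hc
          rw [if_neg hc, if_neg h1]

theorem pvZi_set (res : List Int) : ∀ (m : Nat) (curr : Int), curr ≠ 0 →
    m < (pvZi res).length →
    pvZi (res.set ((pvZi res).getD m 0).toNat curr) = (pvZi res).eraseIdx m := by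
  induction res with
  | nil => intro m curr hc hm; simp [pvZi] at hm
  | cons x xs ih =>
      intro m curr hc hm
      by_cases hx : x = 0
      · subst hx
        rw [show pvZi ((0:Int) :: xs) = 0 :: (pvZi xs).map (· + 1) from by simp [pvZi]] at *
        cases m with
        | zero => simp [pvZi, hc]
        | succ t =>
            have ht : t < (pvZi xs).length := by simpa using hm
            have hgd : ((0:Int) :: (pvZi xs).map (· + 1)).getD (t + 1) 0
                = (pvZi xs).getD t 0 + 1 := by
              simpa [List.getD_cons_succ] using pvGetD_map_add_one (pvZi xs) t ht
            rw [hgd]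
            have hp : 0 ≤ (pvZi xs).getD t 0 := pvZi_nonneg xs _ (pvGetD_mem _ _ ht)
            have htn : ((pvZi xs).getD t 0 + 1).toNat = ((pvZi xs).getD t 0).toNat + 1 := by
              omega
            rw [htn, List.set_cons_succ, List.eraseIdx_cons_succ]
            rw [show pvZi ((0:Int) :: xs.set ((pvZi xs).getD t 0).toNat curr)
              = 0 :: (pvZi (xs.set ((pvZi xs).getD t 0).toNat curr)).map (· + 1) from by
                simp [pvZi]]
            rw [ih t curr hc ht, List.eraseIdx_map]
      · rw [show pvZi (x :: xs) = (pvZi xs).map (· + 1) from by simp [pvZi, hx]] at *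
        have hm' : m < (pvZi xs).length := by simpa using hm
        rw [pvGetD_map_add_one _ _ hm']
        have hp : 0 ≤ (pvZi xs).getD m 0 := pvZi_nonneg xs _ (pvGetD_mem _ _ hm')
        have htn : ((pvZi xs).getD m 0 + 1).toNat = ((pvZi xs).getD m 0).toNat + 1 := by
          omega
        rw [htn, List.set_cons_succ]
        rw [show pvZi (x :: xs.set ((pvZi xs).getD m 0).toNat curr)
          = (pvZi (xs.set ((pvZi xs).getD m 0).toNat curr)).map (· + 1) from by
            simp [pvZi, hx]]
        rw [ih m curr hc hm', List.eraseIdx_map]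

-- one loop iteration of B, on a state in the invariant, equals one iteration of A
theorem pvStep_eq (res : List Int) (k curr : Int) (hc : curr ≠ 0) :
    (if 0 ≤ k ∧ k < ((pvZi res).length : Int) then
       match PySem.List.pop? (pvZi res) k with
       | some r => (res.set r.1.toNat curr, r.2, curr + 1)
       | none => (res, pvZi res, curr + 1)
     else (res, pvZi res, curr + 1))
    = (pvInnerA res k curr 0, pvZi (pvInnerA res k curr 0), curr + 1) := by
  by_cases h : 0 ≤ k ∧ k < ((pvZi res).length : Int)
  · have hk : k = ((k.toNat : Nat) : Int) := by omega
    have hlt : k.toNat < (pvZi res).length := by omega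
    have hpop : PySem.List.pop? (pvZi res) k
        = some ((pvZi res)[k.toNat], (pvZi res).eraseIdx k.toNat) := by
      conv_lhs => rw [hk]
      exact PySem.List.pop?_natCast _ _ hlt
    rw [if_pos h, hpop]
    have hspec := pvInnerA_spec res k curr 0
    have hcond : 0 ≤ k - 0 ∧ (k - 0).toNat < (pvZi res).length := by
      constructor <;> omega
    rw [if_pos hcond] at hspec
    have hgd : (pvZi res).getD (k - 0).toNat 0 = (pvZi res)[k.toNat] := by
      have : (k - 0).toNat = k.toNat := by omega
      rw [this, List.getD_eq_getElem _ _ hlt]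
    rw [hgd] at hspec
    have hzi := pvZi_set res k.toNat curr hc hlt
    have hgd' : (pvZi res).getD k.toNat 0 = (pvZi res)[k.toNat] :=
      List.getD_eq_getElem _ _ hlt
    rw [hgd'] at hzi
    simp [hspec, hzi]
  · rw [if_neg h]
    have hspec := pvInnerA_spec res k curr 0
    have hcond : ¬ (0 ≤ k - 0 ∧ (k - 0).toNat < (pvZi res).length) := by omega
    rw [if_neg hcond] at hspec
    rw [hspec]

theorem pvFold (ls : List Int) : ∀ (res : List Int) (curr : Int), curr ≠ 0 →
    (0 < curr) →
    (ls.foldl (fun (st : List Int × List Int × Int) k =>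
        if 0 ≤ k ∧ k < (st.2.1.length : Int) then
          match PySem.List.pop? st.2.1 k with
          | some r => (st.1.set r.1.toNat st.2.2, r.2, st.2.2 + 1)
          | none => (st.1, st.2.1, st.2.2 + 1)
        else (st.1, st.2.1, st.2.2 + 1))
      (res, pvZi res, curr)).1
    = (ls.foldl (fun (st : List Int × Int) k => (pvInnerA st.1 k st.2 0, st.2 + 1))
        (res, curr)).1 := by
  induction ls with
  | nil => intro res curr _ _; rfl
  | cons k ks ih =>
      intro res curr hc hpos
      rw [List.foldl_cons, List.foldl_cons]
      have hstep := pvStep_eq res k curr hc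
      simp only at hstep ⊢
      rw [hstep]
      exact ih (pvInnerA res k curr 0) (curr + 1) (by omega) (by omega)

theorem pvZi_repl_aux (n : Nat) :
    pvZi (List.replicate n (0:Int)) = (List.range n).map Int.ofNat := by
  induction n with
  | zero => simp [pvZi]
  | succ m ih =>
      rw [List.replicate_succ, show pvZi ((0:Int) :: List.replicate m 0)
        = 0 :: (pvZi (List.replicate m 0)).map (· + 1) from by simp [pvZi],
        ih, List.range_succ_eq_map, List.map_cons, List.map_map, List.map_map]
      congr 1

theorem pvZi_replicate (n : Nat) : pvZi (List.replicate n 0) = PySem.List.pyRange 0 n 1 := by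
  rw [PySem.List.pyRange_one, pvZi_repl_aux]
  have h : ((n : Int) - 0).toNat = n := by omega
  rw [h]
  exact List.map_congr_left fun a _ => by simp

theorem pvInit (n : Nat) :
    (PySem.List.pyRange 0 n 1).map (fun _ => (0:Int)) = List.replicate n 0 := by
  rw [List.map_const']
  congr 1
  rw [PySem.List.length_pyRange_one]
  omega

-- ===== VERDICT (by name: the statement is the Claim_ definition above) =====
theorem recover_straight_spec : Claim_equal_recover_straight := by
  intro ls _
  unfold Spec_recover_straight recover_straight recover_straight_alt
  simp only
  rw [pvInit ls.length, ← pvZi_replicate ls.length]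
  exact (pvFold ls (List.replicate ls.length 0) 1 (by omega) (by omega)).symm
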